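-- pv_equiv track=rewrite | github.com/Kurone96Kou/kt2 | task1/main.py | wordss
-- ===== SOURCE A (Python) =====
-- import string as _str
--
-- def wordss(txt):  #Выбираем слова из предложения.
--     res = {}
--     for p in _str.punctuation:# Знаки препинания не входят в слова.
--         txt = txt.replace(p, ' ')
--     words = txt.split()
--     for wor in words:
--         res[wor] = len(wor)
--     return res
-- ===== SOURCE B (Python) =====
-- import string as _str
--
-- def wordss(txt):
--     seps = set(_str.punctuation)
--     res = {}
--     buf = []
--     for c in txt:
--         if c in seps or c.isspace():
--             if buf:
--                 w = ''.join(buf)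
--                 res[w] = len(w)
--                 buf = []
--         else:
--             buf.append(c)
--     if buf:
--         w = ''.join(buf)
--         res[w] = len(w)
--     return res
-- ===== Notes on version B (the rewrite author's own statement) =====
-- stated objective: alternative
-- what changed: Single character-scan with a token buffer replaces the 32 whole-string replace passes followed by split; it trades A's multiple C-level string passes for one explicit pass.
import Mathlib
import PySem

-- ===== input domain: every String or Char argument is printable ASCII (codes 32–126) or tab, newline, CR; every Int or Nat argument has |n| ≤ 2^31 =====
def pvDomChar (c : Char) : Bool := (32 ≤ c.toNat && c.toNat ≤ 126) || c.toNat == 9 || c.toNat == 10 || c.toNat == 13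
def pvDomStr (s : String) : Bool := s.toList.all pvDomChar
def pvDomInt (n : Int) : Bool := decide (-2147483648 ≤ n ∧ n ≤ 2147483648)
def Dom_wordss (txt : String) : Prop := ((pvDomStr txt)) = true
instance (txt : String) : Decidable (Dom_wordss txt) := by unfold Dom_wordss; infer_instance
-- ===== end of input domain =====

-- B replaces A's 32 whole-string replace passes + split by a single character scan with a
-- token buffer (alternative decomposition; same return value).

-- string.punctuation
def pvPunct : String := "!\"#$%&'()*+,-./:;<=>?@[\\]^_`{|}~"

-- ===== PORT A =====
def wordss (txt : String) : List (String × Int) :=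
  -- for p in string.punctuation: txt = txt.replace(p, ' '); then words = txt.split();
  -- for wor in words: res[wor] = len(wor)
  (List.foldl (fun d w => d.insert w (PySem.Str.len w)) (PySem.Dict.empty : PySem.Dict String Int)
    (PySem.Str.split₀
      (List.foldl (fun t p => PySem.Str.replace t (String.singleton p) " ") txt pvPunct.toList))).items

-- ===== PORT B =====
-- the loop of Source B: (buf, res) over the characters; ''.join(buf) over single chars is String.ofList buf
def wordssAltGo (seps : List Char) : List Char → List Char → PySem.Dict String Int → PySem.Dict String Int
  | [], buf, d => if buf.isEmpty then d else d.insert (String.ofList buf) (PySem.Str.len (String.ofList buf))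
  | c :: rest, buf, d =>
    if seps.contains c || PySem.Chars.isspace c then
      if buf.isEmpty then wordssAltGo seps rest [] d
      else wordssAltGo seps rest [] (d.insert (String.ofList buf) (PySem.Str.len (String.ofList buf)))
    else wordssAltGo seps rest (buf ++ [c]) d

def wordss_alt (txt : String) : List (String × Int) :=
  (wordssAltGo (PySem.Set.ofList pvPunct.toList) txt.toList [] (PySem.Dict.empty : PySem.Dict String Int)).items

-- ===== PRECONDITION & SPEC =====
def Spec_wordss (txt : String) (out : List (String × Int)) : Prop := out = wordss_alt txt
instance (txt : String) (out : List (String × Int)) : Decidable (Spec_wordss txt out) := by unfold Spec_wordss; infer_instance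

-- ===== CLAIM (what is proved, stated in full; the proofs are below) =====
def Claim_equal_wordss : Prop := ∀ (txt : String), Dom_wordss txt → Spec_wordss txt (wordss txt)

-- ===== LEMMAS AND PROOFS =====

-- replacing the single character p by ' '
def pvRepl (p c : Char) : Char := if c = p then ' ' else c

-- all punctuation replaced at once
def pvF (c : Char) : Char := if c ∈ pvPunct.toList then ' ' else c

-- separator predicate of B
def pvSep (c : Char) : Bool := pvPunct.toList.contains c || PySem.Chars.isspace c

-- reference tokenisation (buffer in forward order)
def pvToks : List Char → List Char → List (List Char)
  | [], buf => if buf.isEmpty then [] else [buf]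
  | c :: rest, buf =>
    if pvSep c then (if buf.isEmpty then pvToks rest [] else buf :: pvToks rest []) else pvToks rest (buf ++ [c])

theorem pvReplaceGo (p : Char) : ∀ (fuel : Nat) (l acc : List Char), l.length ≤ fuel →
    PySem.Chars.replace.go [p] [' '] fuel l acc = acc.reverse ++ l.map (pvRepl p) := by
  intro fuel
  induction fuel with
  | zero => intro l acc h; interval_cases hl : l.length; simp at hl; subst hl; simp [PySem.Chars.replace.go]
  | succ n ih =>
    intro l acc h
    cases l with
    | nil => simp [PySem.Chars.replace.go]
    | cons c t =>
      simp only [PySem.Chars.replace.go, List.isPrefixOf, List.map]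
      by_cases hc : c = p
      · subst hc
        simp only [BEq.rfl, Bool.true_and, ite_true]
        rw [show (List.drop [c].length (c :: t)) = t by simp]
        rw [ih t _ (by simpa using h)]
        simp [pvRepl]
      · simp only [Bool.and_true, beq_iff_eq]
        rw [if_neg (fun h' => hc h'.symm)]
        rw [ih t _ (by simpa using h)]
        simp [pvRepl, hc]

theorem pvReplaceChar (p : Char) (cs : List Char) :
    PySem.Chars.replace cs [p] [' '] = cs.map (pvRepl p) := by
  unfold PySem.Chars.replace
  rw [show (([p] : List Char).isEmpty) = false from rfl]
  simp only [Bool.false_eq_true, if_false]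
  rw [pvReplaceGo p cs.length cs [] le_rfl]; simp

theorem pvFoldReplace : ∀ (ps : List Char) (t : String),
    (List.foldl (fun t p => PySem.Str.replace t (String.singleton p) " ") t ps).toList
      = List.foldl (fun cs p => cs.map (pvRepl p)) t.toList ps := by
  intro ps
  induction ps with
  | nil => intro t; simp
  | cons p ps ih =>
    intro t
    simp only [List.foldl_cons]
    rw [ih]
    congr 1
    rw [PySem.Str.toList_replace]
    simpa using pvReplaceChar p t.toList

theorem pvFoldMap : ∀ (ps : List Char) (cs : List Char),
    List.foldl (fun cs p => cs.map (pvRepl p)) cs ps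
      = cs.map (fun c => List.foldl (fun x p => pvRepl p x) c ps) := by
  intro ps
  induction ps with
  | nil => intro cs; simp
  | cons p ps ih =>
    intro cs
    simp only [List.foldl_cons]
    rw [ih, List.map_map]
    rfl

theorem pvFoldSpaceFix : ∀ (ps : List Char), ' ' ∉ ps →
    List.foldl (fun x p => pvRepl p x) ' ' ps = ' ' := by
  intro ps
  induction ps with
  | nil => intro _; rfl
  | cons p ps ih =>
    intro h
    simp only [List.mem_cons, not_or] at h
    rw [List.foldl_cons, show pvRepl p ' ' = ' ' by simp [pvRepl]]
    exact ih h.2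

theorem pvPointwise : ∀ (ps : List Char) (c : Char), ' ' ∉ ps →
    List.foldl (fun x p => pvRepl p x) c ps = if c ∈ ps then ' ' else c := by
  intro ps
  induction ps with
  | nil => intro c _; simp
  | cons p ps ih =>
    intro c h
    simp only [List.mem_cons, not_or] at h
    rw [List.foldl_cons]
    by_cases hc : c = p
    · subst hc
      rw [show pvRepl c c = ' ' by simp [pvRepl]]
      rw [pvFoldSpaceFix ps h.2]
      simp
    · rw [show pvRepl p c = c by simp [pvRepl, hc]]
      rw [ih c h.2]
      simp [List.mem_cons, hc]

theorem pvFoldEqMapF (t : String) :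
    (List.foldl (fun t p => PySem.Str.replace t (String.singleton p) " ") t pvPunct.toList).toList
      = t.toList.map pvF := by
  rw [pvFoldReplace, pvFoldMap]
  apply List.map_congr_left
  intro c _
  rw [pvPointwise _ c (by decide)]
  rfl

theorem pvSepF (c : Char) : PySem.Chars.isspace (pvF c) = pvSep c := by
  unfold pvF pvSep
  by_cases h : c ∈ pvPunct.toList
  · simp [h]; decide
  · simp [h]

theorem pvSplitToks : ∀ (cs cur : List Char) (acc : List (List Char)),
    PySem.Chars.split₀.go (cs.map pvF) cur acc = acc.reverse ++ pvToks cs cur.reverse := by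
  intro cs
  induction cs with
  | nil =>
    intro cur acc
    simp only [List.map_nil, PySem.Chars.split₀.go, pvToks]
    by_cases h : cur.isEmpty
    · simp_all
    · have : cur.reverse.isEmpty = false := by simp_all
      simp_all
  | cons c rest ih =>
    intro cur acc
    simp only [List.map_cons, PySem.Chars.split₀.go, pvSepF, pvToks]
    by_cases hs : pvSep c
    · simp only [hs, if_true]
      by_cases hb : cur.isEmpty
      · have : cur = [] := by simpa [List.isEmpty_iff] using hb
        subst this
        simp [ih]
      · have : cur.reverse.isEmpty = false := by simp_all
        simp only [hb, Bool.false_eq_true, if_false, this, ih]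
        simp
    · simp only [hs, Bool.false_eq_true, if_false]
      by_cases hf : pvF c = c
      · rw [hf, ih]
        simp
      · -- pvF c ≠ c means c is punctuation, hence pvSep c — contradiction
        exfalso
        apply hs
        unfold pvF at hf
        unfold pvSep
        by_cases h : c ∈ pvPunct.toList
        · simp [h]
        · simp [h] at hf

theorem pvAltGoFold : ∀ (cs buf : List Char) (d : PySem.Dict String Int),
    wordssAltGo pvPunct.toList cs buf d
      = List.foldl (fun d w => d.insert (String.ofList w) (PySem.Str.len (String.ofList w))) d (pvToks cs buf) := by
  intro cs
  induction cs with
  | nil =>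
    intro buf d
    simp only [wordssAltGo, pvToks]
    by_cases h : buf.isEmpty <;> simp [h]
  | cons c rest ih =>
    intro buf d
    simp only [wordssAltGo, pvToks, pvSep]
    by_cases hs : (pvPunct.toList.contains c || PySem.Chars.isspace c) = true
    · have hs' : c ∈ pvPunct.toList ∨ PySem.Chars.isspace c = true := by
        simpa [List.contains_iff_mem] using hs
      by_cases hb : buf.isEmpty
      · simp [hs', hb, ih]
      · simp [hs', hb, ih]
    · have hs' : ¬(c ∈ pvPunct.toList ∨ PySem.Chars.isspace c = true) := by
        simpa [List.contains_iff_mem] using hs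
      simp [hs', ih]

theorem pvSetOfListPunct : PySem.Set.ofList pvPunct.toList = pvPunct.toList := by decide

-- ===== VERDICT (by name: the statement is the Claim_ definition above) =====
theorem wordss_spec : Claim_equal_wordss := by
  intro txt _
  unfold Spec_wordss wordss wordss_alt
  rw [pvSetOfListPunct, pvAltGoFold]
  set T := List.foldl (fun t p => PySem.Str.replace t (String.singleton p) " ") txt pvPunct.toList with hT
  have h1 : List.map String.toList (PySem.Str.split₀ T) = pvToks txt.toList [] := by
    rw [PySem.Str.split₀_map_toList, hT, pvFoldEqMapF]
    have := pvSplitToks txt.toList [] []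
    simpa [PySem.Chars.split₀] using this
  have hwords : PySem.Str.split₀ T = (pvToks txt.toList []).map String.ofList := by
    rw [← h1, List.map_map]
    simp [Function.comp_def]
  rw [hwords, List.foldl_map]
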